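-- pv_equiv track=rewrite | github.com/lahirigautam-commits/mittal-daily-news-report | auto_daily_report.py | first_n_sentences
-- ===== SOURCE A (Python) =====
-- def first_n_sentences(text, n=3, max_chars=4000):
--     sentences = []
--     cur = ""
--     for ch in text:
--         cur += ch
--         if ch in ".!?":
--             s = cur.strip()
--             if s:
--                 sentences.append(s)
--             cur = ""
--             if len(sentences) >= n:
--                 break
--     if len(sentences) < n and cur.strip():
--         sentences.append(cur.strip())
--     result = " ".join(sentences)
--     if max_chars is not None:
--         return result[:max_chars]
--     return result
-- ===== SOURCE B (Python) =====
-- def first_n_sentences(text, n=3, max_chars=4000):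
--     # Phase 1: chunk the text: terminator-ended segments (as char lists), last chunk = unterminated tail.
--     chunks = [[]]
--     for ch in text:
--         chunks[-1].append(ch)
--         if ch in ".!?":
--             chunks.append([])
--     stripped = ["".join(p).strip() for p in chunks[:-1]]
--     tail = "".join(chunks[-1]).strip()
--     # Phase 2: cut = number of segments the running count of non-empty sentences needs to reach n (all if never).
--     cnt = 0
--     cut = len(stripped)
--     for i, s in enumerate(stripped):
--         if s:
--             cnt += 1
--         if cnt >= n:
--             cut = i + 1
--             break
--     sentences = [s for s in stripped[:cut] if s]
--     if len(sentences) < n and tail: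
--         sentences.append(tail)
--     result = " ".join(sentences)
--     return result if max_chars is None else result[:max_chars]
-- ===== Notes on version B (the rewrite author's own statement) =====
-- stated objective: alternative
-- what changed: B replaces A's single fused char-loop (accumulate cur, strip/append/break inline) by a staged pipeline: chunk the whole text into terminator-ended segments plus a tail, compute a cut index from a running count of non-empty stripped segments, then filter-and-take the stripped segments before applying the same tail rule and max_chars slice.
import Mathlib
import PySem

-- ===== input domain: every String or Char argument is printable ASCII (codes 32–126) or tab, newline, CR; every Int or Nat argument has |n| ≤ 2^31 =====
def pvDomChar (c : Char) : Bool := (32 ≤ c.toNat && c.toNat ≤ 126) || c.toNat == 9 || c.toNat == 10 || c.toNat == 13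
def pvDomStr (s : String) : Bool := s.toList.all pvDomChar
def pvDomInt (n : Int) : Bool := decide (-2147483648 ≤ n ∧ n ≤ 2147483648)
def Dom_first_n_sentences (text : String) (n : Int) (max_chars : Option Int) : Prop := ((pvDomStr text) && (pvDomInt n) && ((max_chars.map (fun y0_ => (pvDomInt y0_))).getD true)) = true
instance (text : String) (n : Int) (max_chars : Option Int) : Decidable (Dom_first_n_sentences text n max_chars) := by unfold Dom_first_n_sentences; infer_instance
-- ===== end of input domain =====

-- B replaces A's fused accumulate-and-break loop by a staged pipeline: chunk the whole text, compute a cut index, then filter/take — an alternative decomposition, same cost.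

-- ===== PORT A =====
-- A's char loop: state = (sentences, cur); break encoded by returning early with cur = [].
def pvALoop (n : Int) : List Char → List (List Char) → List Char → (List (List Char) × List Char)
  | [], sents, cur => (sents, cur)
  | c :: cs, sents, cur =>
    let cur' := cur ++ [c]
    if c = '.' ∨ c = '!' ∨ c = '?' then
      let s := PySem.Chars.strip cur'
      let sents' := if s ≠ [] then sents ++ [s] else sents
      if n ≤ (sents'.length : Int) then (sents', [])
      else pvALoop n cs sents' []
    else pvALoop n cs sents cur'

def first_n_sentences (text : String) (n : Int) (max_chars : Option Int) : String :=
  let r := pvALoop n text.toList [] []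
  let sents := if (r.1.length : Int) < n ∧ PySem.Chars.strip r.2 ≠ [] then r.1 ++ [PySem.Chars.strip r.2] else r.1
  let result := PySem.Chars.join [' '] sents
  match max_chars with
  | some m => String.ofList (PySem.List.slice result none (some m))
  | none => String.ofList result

-- ===== PORT B =====
-- Source B phase 1: chunk list; a terminator closes the current chunk, the final chunk is the tail.
def pvChunks : List Char → List (List Char)
  | [] => [[]]
  | c :: cs =>
    if c = '.' ∨ c = '!' ∨ c = '?' then [c] :: pvChunks cs
    else
      match pvChunks cs with
      | r :: rs => (c :: r) :: rs
      | [] => [[c]]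

-- Source B phase 2: how many segments until the running count of non-empty sentences reaches n (all if never).
def pvCut (n : Int) : List (List Char) → Int → Nat
  | [], _ => 0
  | s :: rest, cnt =>
    let cnt' := if s ≠ [] then cnt + 1 else cnt
    if n ≤ cnt' then 1 else pvCut n rest cnt' + 1

def first_n_sentences_alt (text : String) (n : Int) (max_chars : Option Int) : String :=
  let chunks := pvChunks text.toList
  let stripped := chunks.dropLast.map PySem.Chars.strip
  let tl := PySem.Chars.strip (chunks.getLastD [])
  let sentences := (stripped.take (pvCut n stripped 0)).filter (· ≠ [])
  let sents := if (sentences.length : Int) < n ∧ tl ≠ [] then sentences ++ [tl] else sentences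
  let result := PySem.Chars.join [' '] sents
  match max_chars with
  | some m => String.ofList (PySem.List.slice result none (some m))
  | none => String.ofList result

-- ===== PRECONDITION & SPEC =====
def Spec_first_n_sentences (text : String) (n : Int) (max_chars : Option Int) (out : String) : Prop := out = first_n_sentences_alt text n max_chars
instance (text : String) (n : Int) (max_chars : Option Int) (out : String) : Decidable (Spec_first_n_sentences text n max_chars out) := by unfold Spec_first_n_sentences; infer_instance

-- ===== CLAIM (what is proved, stated in full; the proofs are below) =====
def Claim_equal_first_n_sentences : Prop := ∀ (text : String) (n : Int) (max_chars : Option Int), Dom_first_n_sentences text n max_chars → Spec_first_n_sentences text n max_chars (first_n_sentences text n max_chars)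

-- ===== LEMMAS AND PROOFS =====
-- pvChunks with the pending prefix cur glued onto its first chunk (proof-only helper).
def pvPre (cur : List Char) (cs : List Char) : List (List Char) :=
  match pvChunks cs with
  | r :: rs => (cur ++ r) :: rs
  | [] => [cur]

lemma pvChunks_ne_nil : ∀ cs, pvChunks cs ≠ [] := by
  intro cs
  cases cs with
  | nil => simp [pvChunks]
  | cons c cs =>
    simp only [pvChunks]
    split_ifs
    · simp
    · cases h : pvChunks cs <;> simp

lemma pvPre_nil (cs : List Char) : pvPre [] cs = pvChunks cs := by
  unfold pvPre
  cases h : pvChunks cs with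
  | nil => exact absurd h (pvChunks_ne_nil cs)
  | cons r rs => simp

-- Key invariant: A's fused loop (plus tail rule) equals B's chunk/cut/filter pipeline (plus tail rule).
lemma pvKey (n : Int) : ∀ (cs cur : List Char) (sents : List (List Char)),
    (if ((pvALoop n cs sents cur).1.length : Int) < n ∧ PySem.Chars.strip (pvALoop n cs sents cur).2 ≠ [] then
       (pvALoop n cs sents cur).1 ++ [PySem.Chars.strip (pvALoop n cs sents cur).2]
     else (pvALoop n cs sents cur).1)
    =
    (let chunks := pvPre cur cs
     let stripped := chunks.dropLast.map PySem.Chars.strip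
     let tl := PySem.Chars.strip (chunks.getLastD [])
     let sentences := sents ++ (stripped.take (pvCut n stripped (sents.length : Int))).filter (· ≠ [])
     if (sentences.length : Int) < n ∧ tl ≠ [] then sentences ++ [tl] else sentences) := by
  intro cs
  induction cs with
  | nil =>
    intro cur sents
    simp [pvALoop, pvPre, pvChunks, pvCut]
  | cons c cs ih =>
    intro cur sents
    by_cases hc : c = '.' ∨ c = '!' ∨ c = '?'
    · have hne := pvChunks_ne_nil cs
      have hpre : pvPre cur (c :: cs) = (cur ++ [c]) :: pvChunks cs := by
        simp [pvPre, pvChunks, hc]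
      have hlast : ∀ (a : List Char), ((a :: pvChunks cs).getLastD [] : List Char) = (pvChunks cs).getLastD [] := by
        intro a
        cases h : pvChunks cs with
        | nil => exact absurd h hne
        | cons r rs => simp
      simp only [pvALoop, hpre, if_pos hc]
      rw [List.dropLast_cons_of_ne_nil hne, hlast]
      simp only [List.map_cons, pvCut]
      by_cases hs0 : PySem.Chars.strip (cur ++ [c]) = []
      · simp only [hs0, ne_eq, not_true_eq_false, if_neg, not_false_eq_true]
        by_cases hn : n ≤ (sents.length : Int)
        · simp only [if_pos hn]
          have : PySem.Chars.strip ([] : List Char) = [] := by decide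
          simp [this, hn]
        · simp only [if_neg hn]
          have := ih [] sents
          rw [this, pvPre_nil]
          simp [List.take_succ_cons]
      · have hsents : ((if PySem.Chars.strip (cur ++ [c]) ≠ [] then sents ++ [PySem.Chars.strip (cur ++ [c])] else sents) : List (List Char)) = sents ++ [PySem.Chars.strip (cur ++ [c])] := by
          simp [hs0]
        rw [hsents]
        by_cases hn : n ≤ ((sents ++ [PySem.Chars.strip (cur ++ [c])]).length : Int)
        · simp only [if_pos hn]
          have hn' : n ≤ (if PySem.Chars.strip (cur ++ [c]) ≠ [] then (sents.length : Int) + 1 else (sents.length : Int)) := by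
            simp [hs0]; simpa using hn
          have : PySem.Chars.strip ([] : List Char) = [] := by decide
          simp only [if_pos hn', this]
          simp [List.take_succ_cons, hs0, List.append_assoc]
          intro h
          exfalso
          simp at hn
          omega
        · simp only [if_neg hn]
          have hn' : ¬ n ≤ (if PySem.Chars.strip (cur ++ [c]) ≠ [] then (sents.length : Int) + 1 else (sents.length : Int)) := by
            simp [hs0]; simp at hn; omega
          simp only [if_neg hn']
          have := ih [] (sents ++ [PySem.Chars.strip (cur ++ [c])])
          rw [this, pvPre_nil]
          simp [List.take_succ_cons, hs0, List.append_assoc]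
    · have hpre : pvPre cur (c :: cs) = pvPre (cur ++ [c]) cs := by
        unfold pvPre
        simp only [pvChunks, hc, if_neg, not_false_iff]
        cases h : pvChunks cs with
        | nil => exact absurd h (pvChunks_ne_nil cs)
        | cons r rs => simp
      simp only [pvALoop, hc, if_neg, not_false_iff, hpre]
      exact ih (cur ++ [c]) sents

-- ===== VERDICT (by name: the statement is the Claim_ definition above) =====
theorem first_n_sentences_spec : Claim_equal_first_n_sentences := by
  intro text n max_chars _
  unfold Spec_first_n_sentences first_n_sentences first_n_sentences_alt
  have h := pvKey n text.toList [] []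
  rw [pvPre_nil] at h
  simp only [List.nil_append, List.length_nil, Nat.cast_zero] at h
  simp only [h]
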